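-- pv_equiv track=rewrite | github.com/jake-d-s/swissbit_tools | venv/Include/JUtil.py | fixSingleSlash
-- ===== SOURCE A (Python) =====
-- def fixSingleSlash(pathString):
--
--     newString = []
--     for char in pathString:
--         newString.append(char)
--         if (char == '\\'):
--             newString.append(char)
--     pathString = ''.join(newString)
--     return pathString
-- ===== SOURCE B (Python) =====
-- def fixSingleSlash(pathString):
--     segments = pathString.split('\\')
--     return '\\\\'.join(segments)
-- ===== Notes on version B (the rewrite author's own statement) =====
-- stated objective: faster
-- what changed: Replaces the character-by-character list accumulator (appending each char and duplicating backslashes) with a split on the backslash character followed by a join with a doubled-backslash separator, processing whole backslash-free segments at a time.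
import Mathlib
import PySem

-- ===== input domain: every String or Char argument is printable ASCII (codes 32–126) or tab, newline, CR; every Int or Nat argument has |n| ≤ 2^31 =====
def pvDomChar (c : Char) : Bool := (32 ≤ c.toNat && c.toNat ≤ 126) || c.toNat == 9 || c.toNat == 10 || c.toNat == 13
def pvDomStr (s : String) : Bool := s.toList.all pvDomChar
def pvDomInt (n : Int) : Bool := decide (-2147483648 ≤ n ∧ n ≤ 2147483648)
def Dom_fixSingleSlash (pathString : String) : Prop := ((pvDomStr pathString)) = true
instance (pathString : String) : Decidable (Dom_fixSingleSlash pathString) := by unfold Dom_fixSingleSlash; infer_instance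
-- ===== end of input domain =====

-- B doubles backslashes by splitting on '\' and rejoining with '\\' instead of A's per-character accumulator loop; objective: idiomatic.

-- ===== PORT A =====
-- for char in pathString: append char; if char == '\\': append it again; return ''.join(newString)
def fixSingleSlash (pathString : String) : String :=
  let newString :=
    pathString.toList.foldl
      (fun acc c =>
        let acc := acc ++ [c]
        if c = '\\' then acc ++ [c] else acc)
      ([] : List Char)
  String.ofList newString

-- ===== PORT B =====
-- segments = pathString.split('\\'); return '\\\\'.join(segments)
def fixSingleSlash_alt (pathString : String) : String :=
  let segments := PySem.Chars.splitOn pathString.toList ['\\']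
  String.ofList (PySem.Chars.join ['\\', '\\'] segments)

-- ===== PRECONDITION & SPEC =====
def Spec_fixSingleSlash (pathString : String) (out : String) : Prop := out = fixSingleSlash_alt pathString
instance (pathString : String) (out : String) : Decidable (Spec_fixSingleSlash pathString out) := by unfold Spec_fixSingleSlash; infer_instance

-- ===== CLAIM (what is proved, stated in full; the proofs are below) =====
def Claim_equal_fixSingleSlash : Prop := ∀ (pathString : String), Dom_fixSingleSlash pathString → Spec_fixSingleSlash pathString (fixSingleSlash pathString)

-- ===== LEMMAS AND PROOFS =====

-- the doubled string, as a simple structural recursion (proof-internal reference form)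
def pvDouble : List Char → List Char
  | [] => []
  | c :: cs => if c = '\\' then c :: c :: pvDouble cs else c :: pvDouble cs

-- A's foldl accumulates pvDouble
theorem pvFoldl_double (l acc : List Char) :
    l.foldl (fun acc c => let acc := acc ++ [c]; if c = '\\' then acc ++ [c] else acc) acc
      = acc ++ pvDouble l := by
  induction l generalizing acc with
  | nil => simp [pvDouble]
  | cons c cs ih =>
    simp only [List.foldl_cons, pvDouble]
    by_cases h : c = '\\' <;> simp only [h, if_pos] <;> rw [ih] <;> simp

-- reference form of splitOn's accumulator loop
def pvSplitAux : List Char → List Char → List (List Char)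
  | [], cur => [cur.reverse]
  | c :: rest, cur =>
      if c = '\\' then cur.reverse :: pvSplitAux rest [] else pvSplitAux rest (c :: cur)

theorem pvSplitAux_ne_nil (l cur : List Char) : pvSplitAux l cur ≠ [] := by
  induction l generalizing cur with
  | nil => simp [pvSplitAux]
  | cons c rest ih =>
    simp only [pvSplitAux]
    by_cases h : c = '\\' <;> simp [h, ih]

theorem pvGo_eq (fuel : Nat) (l cur : List Char) (acc : List (List Char)) (h : l.length < fuel) :
    PySem.Chars.splitOn.go ['\\'] fuel l cur acc = acc.reverse ++ pvSplitAux l cur := by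
  induction fuel generalizing l cur acc with
  | zero => omega
  | succ n ih =>
    cases l with
    | nil => simp [PySem.Chars.splitOn.go, pvSplitAux]
    | cons c rest =>
      simp only [PySem.Chars.splitOn.go]
      by_cases hc : c = '\\'
      · have hp : List.isPrefixOf ['\\'] (c :: rest) = true := by simp [hc]
        rw [if_pos hp]
        simp only [List.length_singleton, List.drop_succ_cons, List.drop_zero]
        simp only [List.length_cons] at h
        rw [ih _ _ _ (by omega)]
        simp [pvSplitAux, hc]
      · have hp : List.isPrefixOf ['\\'] (c :: rest) = false := by
          simp [List.isPrefixOf]; exact fun hh => hc hh.symm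
        rw [if_neg (by simp [hp])]
        simp only [List.length_cons] at h
        rw [ih _ _ _ (by omega)]
        simp [pvSplitAux, hc]

theorem pvJoin_splitAux (l cur : List Char) :
    PySem.Chars.join ['\\', '\\'] (pvSplitAux l cur) = cur.reverse ++ pvDouble l := by
  induction l generalizing cur with
  | nil => simp [pvSplitAux, pvDouble, PySem.Chars.join, List.intercalate]
  | cons c rest ih =>
    simp only [pvSplitAux, pvDouble]
    by_cases hc : c = '\\'
    · simp only [hc, if_pos]
      obtain ⟨h, t, ht⟩ : ∃ h t, pvSplitAux rest ([] : List Char) = h :: t := by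
        cases hx : pvSplitAux rest ([] : List Char) with
        | nil => exact absurd hx (pvSplitAux_ne_nil rest [])
        | cons h t => exact ⟨h, t, rfl⟩
      have := ih ([] : List Char)
      rw [ht] at this ⊢
      simp only [PySem.Chars.join, List.intercalate] at this ⊢
      simp [this]
    · simp only [if_neg hc]
      rw [ih (c :: cur)]
      simp

-- ===== VERDICT (by name: the statement is the Claim_ definition above) =====
theorem fixSingleSlash_spec : Claim_equal_fixSingleSlash := by
  intro s _
  have h1 := pvGo_eq (s.toList.length + 1) s.toList [] [] (by omega)
  unfold Spec_fixSingleSlash fixSingleSlash fixSingleSlash_alt PySem.Chars.splitOn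
  simp only [pvFoldl_double, h1, pvJoin_splitAux, List.reverse_nil, List.nil_append]
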